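-- pv_equiv track=rewrite | github.com/vaibhav-jain-dev/learning-algo | problems/200-must-solve/recursion/05-phone-mnemonics/python_code.py | phone_mnemonics
-- ===== SOURCE A (Python) =====
-- from typing import List
--
-- DIGIT_LETTERS = {
--     "2": "abc",
--     "3": "def",
--     "4": "ghi",
--     "5": "jkl",
--     "6": "mno",
--     "7": "pqrs",
--     "8": "tuv",
--     "9": "wxyz",
-- }
--
-- def phone_mnemonics(phone_number: str) -> List[str]:
--     """
--     Generate all letter combinations using backtracking.
--
--     Args:
--         phone_number: String of digits 2-9
--
--     Returns:
--         List of all possible letter combinations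
--
--     Example:
--         >>> phone_mnemonics("23")
--         ['ad', 'ae', 'af', 'bd', 'be', 'bf', 'cd', 'ce', 'cf']
--     """
--     if not phone_number:
--         return []
--
--     # Filter out digits with no letter mapping (0, 1)
--     valid_digits = [d for d in phone_number if d in DIGIT_LETTERS]
--     if len(valid_digits) != len(phone_number):
--         return []  # Contains invalid digits
--
--     result: List[str] = []
--     current: List[str] = []
--
--     def backtrack(index: int) -> None:
--         """Generate combinations starting from digit at index."""
--         if index == len(phone_number):
--             result.append("".join(current))
--             return
--
--         digit = phone_number[index]
--         for letter in DIGIT_LETTERS[digit]: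
--             current.append(letter)
--             backtrack(index + 1)
--             current.pop()  # Backtrack
--
--     backtrack(0)
--     return result
-- ===== SOURCE B (Python) =====
-- DIGIT_LETTERS = {
--     "2": "abc",
--     "3": "def",
--     "4": "ghi",
--     "5": "jkl",
--     "6": "mno",
--     "7": "pqrs",
--     "8": "tuv",
--     "9": "wxyz",
-- }
--
-- def phone_mnemonics(phone_number):
--     if not phone_number:
--         return []
--     if any(d not in DIGIT_LETTERS for d in phone_number):
--         return []
--     result = [""]
--     for digit in phone_number:
--         letters = DIGIT_LETTERS[digit]
--         result = [prefix + letter for prefix in result for letter in letters]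
--     return result
-- ===== Notes on version B (the rewrite author's own statement) =====
-- stated objective: alternative
-- what changed: Replaced recursive DFS backtracking with a shared mutable current list by iterative product building: start from [""] and, per digit, extend every existing prefix with each of that digit's letters; validity is checked by a short-circuiting any() instead of building a full filtered list.
import Mathlib
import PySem

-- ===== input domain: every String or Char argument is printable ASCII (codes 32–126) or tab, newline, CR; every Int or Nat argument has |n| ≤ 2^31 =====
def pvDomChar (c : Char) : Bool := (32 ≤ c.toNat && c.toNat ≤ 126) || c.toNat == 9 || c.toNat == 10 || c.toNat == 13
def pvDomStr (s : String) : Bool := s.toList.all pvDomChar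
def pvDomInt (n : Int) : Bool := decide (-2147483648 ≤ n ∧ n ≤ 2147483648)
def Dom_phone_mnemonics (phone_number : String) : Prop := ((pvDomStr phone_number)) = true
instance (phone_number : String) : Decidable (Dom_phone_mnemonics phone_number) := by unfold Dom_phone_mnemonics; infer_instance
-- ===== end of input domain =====

-- B replaces A's recursive backtracking (shared mutable current list) with iterative
-- per-digit product building from [""]; same values and order (objective: alternative).

-- ===== PORT A =====
def digitLetters : PySem.Dict String String :=
  PySem.Dict.ofList [("2","abc"),("3","def"),("4","ghi"),("5","jkl"),
                     ("6","mno"),("7","pqrs"),("8","tuv"),("9","wxyz")]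

-- letters of one digit character (A's DIGIT_LETTERS[digit], iterated char by char)
def lettersOf (d : Char) : List Char :=
  ((digitLetters.get? (String.ofList [d])).getD "").toList

-- A's nested `backtrack(index)`: recursion over the remaining digits, `current` is
-- the shared pfx list of chosen letters; results are appended in loop order.
def phoneBacktrack (rest : List Char) (current : List Char) : List String :=
  match rest with
  | [] => [String.ofList current]
  | d :: ds => (lettersOf d).flatMap (fun letter => phoneBacktrack ds (current ++ [letter]))

def phone_mnemonics (phone_number : String) : List String :=
  if phone_number.toList = [] then []
  else
    let valid_digits := phone_number.toList.filter
      (fun d => digitLetters.contains (String.ofList [d]))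
    if valid_digits.length ≠ phone_number.toList.length then []
    else phoneBacktrack phone_number.toList []

-- ===== PORT B =====
def phone_mnemonics_alt (phone_number : String) : List String :=
  if phone_number.toList = [] then []
  else if phone_number.toList.any
      (fun d => !(digitLetters.contains (String.ofList [d]))) then []
  else phone_number.toList.foldl
    (fun result d => result.flatMap (fun pfx =>
        (lettersOf d).map (fun letter => pfx ++ String.ofList [letter])))
    [""]

-- ===== PRECONDITION & SPEC =====
def Spec_phone_mnemonics (phone_number : String) (out : List String) : Prop := out = phone_mnemonics_alt phone_number
instance (phone_number : String) (out : List String) : Decidable (Spec_phone_mnemonics phone_number out) := by unfold Spec_phone_mnemonics; infer_instance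

-- ===== CLAIM (what is proved, stated in full; the proofs are below) =====
def Claim_equal_phone_mnemonics : Prop := ∀ (phone_number : String), Dom_phone_mnemonics phone_number → Spec_phone_mnemonics phone_number (phone_mnemonics phone_number)

-- ===== LEMMAS AND PROOFS =====

-- B's fold, started from any pfx list, equals backtracking from each pfx in turn.
theorem foldl_eq_flatMap_backtrack (rest : List Char) (acc : List String) :
    rest.foldl
      (fun result d => result.flatMap (fun pfx =>
          (lettersOf d).map (fun letter => pfx ++ String.ofList [letter])))
      acc
    = acc.flatMap (fun p => phoneBacktrack rest p.toList) := by
  induction rest generalizing acc with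
  | nil => simp [phoneBacktrack, String.ofList_toList]
  | cons d ds ih =>
    rw [List.foldl_cons, ih, List.flatMap_assoc]
    show _ = acc.flatMap (fun p => phoneBacktrack (d :: ds) p.toList)
    simp only [phoneBacktrack, List.flatMap_map, String.toList_append]
    congr 1
    funext p
    congr 1
    funext l
    congr 1
    simp [String.toList_ofList]

-- the two validity guards agree
theorem guard_eq (l : List Char) :
    ((l.filter (fun d => digitLetters.contains (String.ofList [d]))).length ≠ l.length)
    ↔ (l.any (fun d => !(digitLetters.contains (String.ofList [d]))) = true) := by
  constructor
  · intro h
    by_contra hc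
    simp only [List.any_eq_true, not_exists, not_and] at hc
    apply h
    rw [List.length_filter_eq_length_iff]
    intro a ha
    have := hc a ha
    simpa using this
  · intro h hlen
    rw [List.length_filter_eq_length_iff] at hlen
    simp only [List.any_eq_true] at h
    obtain ⟨a, ha, hna⟩ := h
    have := hlen a ha
    simp [this] at hna

-- ===== VERDICT (by name: the statement is the Claim_ definition above) =====
theorem phone_mnemonics_spec : Claim_equal_phone_mnemonics := by
  intro s _
  unfold Spec_phone_mnemonics phone_mnemonics phone_mnemonics_alt
  by_cases h0 : s.toList = []
  · simp [h0]
  · simp only [h0, if_false]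
    by_cases hg : (s.toList.filter (fun d => digitLetters.contains (String.ofList [d]))).length ≠ s.toList.length
    · rw [if_pos hg, if_pos ((guard_eq s.toList).mp hg)]
    · rw [if_neg hg, if_neg (by
        intro hb
        exact hg ((guard_eq s.toList).mpr hb))]
      rw [foldl_eq_flatMap_backtrack]
      simp
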